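-- pv_equiv track=rewrite | github.com/alexdeitos/tensorflow | lotofacil/jogar.py | validaGame
-- ===== SOURCE A (Python) =====
-- def validaGame(jogo):
--     cfibo = []
--     cimpar = []
--     cprimo = []
--
--     fibo = [1, 2, 3, 5, 8, 13, 21]
--     impar = [1, 3, 5, 7, 9, 11, 13, 15, 17, 19, 21, 23, 25]
--     primo = [2, 3, 5, 7, 11, 13, 17, 19, 23]
--
--     [cfibo.append(n) for n in jogo if n in fibo and n not in cfibo]
--     [cimpar.append(n) for n in jogo if n in impar and n not in cimpar]
--     [cprimo.append(n) for n in jogo if n in primo and n not in cprimo]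
--
--     return cfibo, cimpar, cprimo
-- ===== SOURCE B (Python) =====
-- def validaGame(jogo):
--     # Dedupe once (first appearance), then characterise each category
--     # arithmetically instead of looking numbers up in constant tables:
--     # the game range is 1..25; fibonacci via generation, prime via trial
--     # division, odd via parity.
--     seen = set()
--     unique = []
--     for n in jogo:
--         if n not in seen:
--             seen.add(n)
--             unique.append(n)
--
--     def is_fib(n):
--         a, b = 1, 2
--         while a < n:
--             a, b = b, a + b
--         return a == n
--
--     def is_prime(n):
--         return n >= 2 and all(n % d for d in range(2, n))
--
--     cfibo = [n for n in unique if 1 <= n <= 25 and is_fib(n)]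
--     cimpar = [n for n in unique if 1 <= n <= 25 and n % 2 == 1]
--     cprimo = [n for n in unique if 1 <= n <= 25 and is_prime(n)]
--     return cfibo, cimpar, cprimo
-- ===== Notes on version B (the rewrite author's own statement) =====
-- stated objective: alternative
-- what changed: Instead of A's three table-filter passes each with its own dedup, B dedupes jogo once (first appearance) and then classifies each surviving number arithmetically in the 1..25 game range: fibonacci by generating the sequence, odd by parity, prime by trial division - no constant tables at all.
import Mathlib
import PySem

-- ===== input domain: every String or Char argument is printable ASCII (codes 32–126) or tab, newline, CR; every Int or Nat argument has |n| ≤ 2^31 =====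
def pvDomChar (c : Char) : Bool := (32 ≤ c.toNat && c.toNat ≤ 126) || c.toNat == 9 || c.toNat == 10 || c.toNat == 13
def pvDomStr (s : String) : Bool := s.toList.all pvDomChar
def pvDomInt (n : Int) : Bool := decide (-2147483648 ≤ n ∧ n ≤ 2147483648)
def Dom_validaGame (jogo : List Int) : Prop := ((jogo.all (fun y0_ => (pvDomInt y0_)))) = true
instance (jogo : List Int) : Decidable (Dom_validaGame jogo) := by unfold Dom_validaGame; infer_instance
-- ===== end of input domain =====

-- ===== PORT A =====
-- B dedupes the input once and classifies numbers arithmetically (fibonacci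
-- generation, trial-division primality, parity, range 1..25) instead of three
-- table-filter passes each with its own dedup (objective: alternative).
def vgFibo : List Int := [1, 2, 3, 5, 8, 13, 21]
def vgImpar : List Int := [1, 3, 5, 7, 9, 11, 13, 15, 17, 19, 21, 23, 25]
def vgPrimo : List Int := [2, 3, 5, 7, 11, 13, 17, 19, 23]

-- each comprehension pass of A: append n if n ∈ table and n not yet collected
def vgPass (table : List Int) (jogo : List Int) : List Int :=
  jogo.foldl (fun acc n => if n ∈ table ∧ n ∉ acc then acc ++ [n] else acc) []

def validaGame (jogo : List Int) : List Int × List Int × List Int :=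
  (vgPass vgFibo jogo, vgPass vgImpar jogo, vgPass vgPrimo jogo)

-- ===== PORT B =====
-- first-appearance dedup loop of Source B: a seen set plus the unique list
def vgDedupStep (st : PySem.Set Int × List Int) (n : Int) : PySem.Set Int × List Int :=
  if PySem.Set.contains st.1 n then st else (PySem.Set.add st.1 n, st.2 ++ [n])

def vgDedup (jogo : List Int) : List Int :=
  (jogo.foldl vgDedupStep (PySem.Set.ofList [], [])).2

-- Source B's `while a < n: a, b = b, a + b; return a == n`, made total with fuel
-- (a strictly increases each step; 64 steps is far past 25, the only range used)
def vgIsFibAux : Nat → Int → Int → Int → Bool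
  | 0, a, _, n => a == n
  | fuel + 1, a, b, n => if a < n then vgIsFibAux fuel b (a + b) n else a == n

def vgIsFib (n : Int) : Bool := vgIsFibAux 64 1 2 n

-- Source B's `n >= 2 and all(n % d for d in range(2, n))`
def vgIsPrime (n : Int) : Bool :=
  n ≥ 2 && (PySem.List.pyRange 2 n 1).all (fun d => PySem.Int.mod n d != 0)

def vgInRange (n : Int) : Bool := 1 ≤ n && n ≤ 25

def validaGame_alt (jogo : List Int) : List Int × List Int × List Int :=
  let u := vgDedup jogo
  (u.filter (fun n => vgInRange n && vgIsFib n),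
   u.filter (fun n => vgInRange n && (PySem.Int.mod n 2 == 1)),
   u.filter (fun n => vgInRange n && vgIsPrime n))

-- ===== PRECONDITION & SPEC =====
def Spec_validaGame (jogo : List Int) (out : List Int × List Int × List Int) : Prop := out = validaGame_alt jogo
instance (jogo : List Int) (out : List Int × List Int × List Int) : Decidable (Spec_validaGame jogo out) := by unfold Spec_validaGame; infer_instance

-- ===== CLAIM =====
def Claim_equal_validaGame : Prop := ∀ (jogo : List Int), Dom_validaGame jogo → Spec_validaGame jogo (validaGame jogo)

-- ===== LEMMAS AND PROOFS =====
-- each arithmetic predicate of B characterises exactly its table of A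
theorem vg_charFibo (n : Int) : (n ∈ vgFibo) ↔ ((vgInRange n && vgIsFib n) = true) := by
  by_cases h : 1 ≤ n ∧ n ≤ 25
  · obtain ⟨h1, h2⟩ := h; interval_cases n <;> decide
  · constructor
    · intro hm; exfalso; simp [vgFibo] at hm; omega
    · intro hb; exfalso
      have : vgInRange n = true := by
        cases hr : vgInRange n
        · rw [hr] at hb; simp at hb
        · rfl
      simp [vgInRange] at this; omega

theorem vg_charImpar (n : Int) : (n ∈ vgImpar) ↔ ((vgInRange n && (PySem.Int.mod n 2 == 1)) = true) := by
  by_cases h : 1 ≤ n ∧ n ≤ 25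
  · obtain ⟨h1, h2⟩ := h; interval_cases n <;> decide
  · constructor
    · intro hm; exfalso; simp [vgImpar] at hm; omega
    · intro hb; exfalso
      have : vgInRange n = true := by
        cases hr : vgInRange n
        · rw [hr] at hb; simp at hb
        · rfl
      simp [vgInRange] at this; omega

theorem vg_charPrimo (n : Int) : (n ∈ vgPrimo) ↔ ((vgInRange n && vgIsPrime n) = true) := by
  by_cases h : 1 ≤ n ∧ n ≤ 25
  · obtain ⟨h1, h2⟩ := h; interval_cases n <;> decide
  · constructor
    · intro hm; exfalso; simp [vgPrimo] at hm; omega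
    · intro hb; exfalso
      have : vgInRange n = true := by
        cases hr : vgInRange n
        · rw [hr] at hb; simp at hb
        · rfl
      simp [vgInRange] at this; omega

-- the seen-set dedup of B equals the plain list dedup (invariant: seen = elements of unique)
theorem vg_dedup_eq_aux (jogo : List Int) (seen : PySem.Set Int) (u : List Int)
    (hinv : ∀ x, PySem.Set.contains seen x = true ↔ x ∈ u) :
    (jogo.foldl vgDedupStep (seen, u)).2
      = jogo.foldl (fun acc n => if n ∈ acc then acc else acc ++ [n]) u := by
  induction jogo generalizing seen u with
  | nil => rfl
  | cons n rest ih =>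
      simp only [List.foldl_cons, vgDedupStep]
      by_cases h : n ∈ u
      · rw [if_pos ((hinv n).mpr h), if_pos h]
        exact ih seen u hinv
      · rw [if_neg (by rw [Bool.not_eq_true]; exact (Bool.eq_false_iff.mpr (fun hc => h ((hinv n).mp hc))).symm ▸ rfl ), if_neg h]
        refine ih _ _ ?_
        intro x
        rw [PySem.Set.contains_iff, PySem.Set.mem_add]
        constructor
        · rintro (hx | hx)
          · exact List.mem_append_left _ ((hinv x).mp (by rw [PySem.Set.contains_iff]; exact hx))
          · simp [hx]
        · intro hx
          rcases List.mem_append.mp hx with hx | hx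
          · left; rw [← PySem.Set.contains_iff]; exact (hinv x).mpr hx
          · right; simpa using hx

theorem vg_dedup_eq (jogo : List Int) :
    vgDedup jogo = jogo.foldl (fun acc n => if n ∈ acc then acc else acc ++ [n]) [] := by
  unfold vgDedup
  exact vg_dedup_eq_aux jogo _ [] (by intro x; rw [PySem.Set.contains_iff]; simp)

-- A's dedup-while-filtering pass over jogo = filtering the once-deduped jogo
theorem vg_pass_eq (table : List Int) (p : Int → Bool)
    (hp : ∀ n, n ∈ table ↔ p n = true) (jogo u : List Int) :
    jogo.foldl (fun acc n => if n ∈ table ∧ n ∉ acc then acc ++ [n] else acc) (u.filter p)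
      = (jogo.foldl (fun acc n => if n ∈ acc then acc else acc ++ [n]) u).filter p := by
  induction jogo generalizing u with
  | nil => rfl
  | cons n rest ih =>
      simp only [List.foldl_cons]
      have hstep :
          (if n ∈ table ∧ n ∉ u.filter p then u.filter p ++ [n] else u.filter p)
            = (if n ∈ u then u else u ++ [n]).filter p := by
        by_cases hu : n ∈ u
        · simp only [if_pos hu]
          by_cases hpn : p n = true
          · have : n ∈ u.filter p := List.mem_filter.mpr ⟨hu, hpn⟩
            rw [if_neg (by tauto)]
          · have : n ∉ table := fun hm => hpn ((hp n).mp hm)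
            rw [if_neg (by tauto)]
        · simp only [if_neg hu]
          have hnf : n ∉ u.filter p := fun hm => hu (List.mem_filter.mp hm).1
          by_cases hpn : p n = true
          · rw [if_pos ⟨(hp n).mpr hpn, hnf⟩]
            simp [List.filter_append, hpn]
          · rw [if_neg (by intro h; exact hpn ((hp n).mp h.1))]
            simp [List.filter_append, Bool.eq_false_iff.mpr hpn]
      rw [hstep, ih]

-- ===== VERDICT =====
theorem validaGame_spec : Claim_equal_validaGame := by
  intro jogo _
  unfold Spec_validaGame validaGame validaGame_alt vgPass
  rw [vg_dedup_eq]
  exact Prod.ext (vg_pass_eq _ _ vg_charFibo jogo [])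
    (Prod.ext (vg_pass_eq _ _ vg_charImpar jogo []) (vg_pass_eq _ _ vg_charPrimo jogo []))
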